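-- pv_equiv track=rewrite | github.com/Striker9000/Trading_HydraV2- | src/trading_hydra/console_dashboard/decision_dashboard.py | categorize_events
-- ===== SOURCE A (Python) =====
-- from typing import Dict, List, Any, Optional
--
-- def categorize_events(events: List[Dict[str, Any]]) -> Dict[str, List[Dict]]:
--     """Categorize events into display sections."""
--     categories = {
--         "ml_signals": [],
--         "news_sentiment": [],
--         "risk_gates": [],
--         "trade_decisions": [],
--         "pnl_attribution": [],
--         "alerts": [],
--     }
--
--     for event in events:
--         event_type = event.get("event", "")
--
--         if event_type in {"ml_signal", "ml_score", "ml_score_entry", "ml_signal_service_score",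
--                         "ml_model_loaded", "decision_signal_update"}:
--             categories["ml_signals"].append(event)
--         elif event_type in {"news_intelligence_result", "news_exit_check", "sentiment_analysis"}:
--             categories["news_sentiment"].append(event)
--         elif event_type in {"risk_gate_check", "risk_orchestrator_evaluation",
--                           "options_risk_gate_blocked", "options_risk_gate_reduce",
--                           "iv_gate_blocked", "iv_gate_passed",
--                           "greek_delta_warning", "greek_gamma_warning", "greek_limit_blocked_entry",
--                           "options_bot_strategy_system_enabled"}:
--             categories["risk_gates"].append(event)
--         elif event_type in {"twentymin_trade_decision", "trade_execution",
--                           "entry_decision", "exit_decision", "exit_signal", "entry_veto",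
--                           "enhanced_options_bot_execution_complete"}:
--             categories["trade_decisions"].append(event)
--         elif event_type in {"pnl_attribution_exit", "pnl_attribution_entry"}:
--             categories["pnl_attribution"].append(event)
--         elif event_type in {"halt_triggered", "correlation_guard_alert",
--                           "vol_of_vol_alert", "pnl_monitor_fat_tail_detected", "pnl_monitor_halt",
--                           "macro_intel_update", "smart_money_signal"}:
--             categories["alerts"].append(event)
--
--     return categories
-- ===== SOURCE B (Python) =====
-- # Staged passes: build each category independently as a filter comprehension over
-- # events (six passes), instead of A's single pass dispatching each event through
-- # an elif chain. Correct because the six type sets are pairwise disjoint.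
-- _CATEGORY_TYPES = [
--     ("ml_signals", frozenset({"ml_signal", "ml_score", "ml_score_entry",
--                               "ml_signal_service_score", "ml_model_loaded",
--                               "decision_signal_update"})),
--     ("news_sentiment", frozenset({"news_intelligence_result", "news_exit_check",
--                                   "sentiment_analysis"})),
--     ("risk_gates", frozenset({"risk_gate_check", "risk_orchestrator_evaluation",
--                               "options_risk_gate_blocked", "options_risk_gate_reduce",
--                               "iv_gate_blocked", "iv_gate_passed",
--                               "greek_delta_warning", "greek_gamma_warning",
--                               "greek_limit_blocked_entry",
--                               "options_bot_strategy_system_enabled"})),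
--     ("trade_decisions", frozenset({"twentymin_trade_decision", "trade_execution",
--                                    "entry_decision", "exit_decision", "exit_signal",
--                                    "entry_veto",
--                                    "enhanced_options_bot_execution_complete"})),
--     ("pnl_attribution", frozenset({"pnl_attribution_exit", "pnl_attribution_entry"})),
--     ("alerts", frozenset({"halt_triggered", "correlation_guard_alert",
--                           "vol_of_vol_alert", "pnl_monitor_fat_tail_detected",
--                           "pnl_monitor_halt", "macro_intel_update",
--                           "smart_money_signal"})),
-- ]
--
--
-- def categorize_events(events):
--     """Categorize events into display sections."""
--     return {cat: [e for e in events if e.get("event", "") in types]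
--             for cat, types in _CATEGORY_TYPES}
-- ===== Notes on version B (the rewrite author's own statement) =====
-- stated objective: idiomatic
-- what changed: Replaces A's single pass with a per-event six-way elif dispatch by six independent staged filter passes, one comprehension per category; correct because the six type sets are pairwise disjoint.
import Mathlib
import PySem

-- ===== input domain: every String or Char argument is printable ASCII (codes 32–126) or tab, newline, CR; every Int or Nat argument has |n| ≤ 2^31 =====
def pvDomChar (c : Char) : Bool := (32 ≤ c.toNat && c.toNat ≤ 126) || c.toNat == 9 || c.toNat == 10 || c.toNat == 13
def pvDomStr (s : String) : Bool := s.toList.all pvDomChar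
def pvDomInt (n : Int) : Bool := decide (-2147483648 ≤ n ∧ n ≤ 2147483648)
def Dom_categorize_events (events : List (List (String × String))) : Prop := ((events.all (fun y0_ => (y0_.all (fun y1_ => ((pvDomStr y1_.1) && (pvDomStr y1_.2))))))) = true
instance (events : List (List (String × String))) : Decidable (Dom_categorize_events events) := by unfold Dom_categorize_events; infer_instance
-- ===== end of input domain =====

set_option maxRecDepth 8192


-- B builds each category by its own filter pass over events (six staged passes, one
-- comprehension per category) instead of A's single pass with a per-event elif dispatch;
-- correct because the six type sets are pairwise disjoint (idiomatic; same cost).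

-- ===== PORT A =====
def categorize_events (events : List (List (String × String))) : List (String × List (List (String × String))) :=
  let categories : PySem.Dict String (List (List (String × String))) :=
    PySem.Dict.ofList [("ml_signals", []), ("news_sentiment", []), ("risk_gates", []),
                       ("trade_decisions", []), ("pnl_attribution", []), ("alerts", [])]
  (events.foldl (fun categories event =>
      let event_type := PySem.Dict.getD (PySem.Dict.ofList event) "event" ""
      if (["ml_signal", "ml_score", "ml_score_entry", "ml_signal_service_score",
           "ml_model_loaded", "decision_signal_update"] : List String).contains event_type then
        categories.modify "ml_signals" [] (· ++ [event])
      else if (["news_intelligence_result", "news_exit_check", "sentiment_analysis"] : List String).contains event_type then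
        categories.modify "news_sentiment" [] (· ++ [event])
      else if (["risk_gate_check", "risk_orchestrator_evaluation",
                "options_risk_gate_blocked", "options_risk_gate_reduce",
                "iv_gate_blocked", "iv_gate_passed",
                "greek_delta_warning", "greek_gamma_warning", "greek_limit_blocked_entry",
                "options_bot_strategy_system_enabled"] : List String).contains event_type then
        categories.modify "risk_gates" [] (· ++ [event])
      else if (["twentymin_trade_decision", "trade_execution",
                "entry_decision", "exit_decision", "exit_signal", "entry_veto",
                "enhanced_options_bot_execution_complete"] : List String).contains event_type then
        categories.modify "trade_decisions" [] (· ++ [event])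
      else if (["pnl_attribution_exit", "pnl_attribution_entry"] : List String).contains event_type then
        categories.modify "pnl_attribution" [] (· ++ [event])
      else if (["halt_triggered", "correlation_guard_alert",
                "vol_of_vol_alert", "pnl_monitor_fat_tail_detected", "pnl_monitor_halt",
                "macro_intel_update", "smart_money_signal"] : List String).contains event_type then
        categories.modify "alerts" [] (· ++ [event])
      else categories)
    categories).items

-- ===== PORT B =====
-- B-side helpers: the six type sets
def S1 : List String := ["ml_signal", "ml_score", "ml_score_entry", "ml_signal_service_score",
                         "ml_model_loaded", "decision_signal_update"]
def S2 : List String := ["news_intelligence_result", "news_exit_check", "sentiment_analysis"]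
def S3 : List String := ["risk_gate_check", "risk_orchestrator_evaluation",
                         "options_risk_gate_blocked", "options_risk_gate_reduce",
                         "iv_gate_blocked", "iv_gate_passed",
                         "greek_delta_warning", "greek_gamma_warning", "greek_limit_blocked_entry",
                         "options_bot_strategy_system_enabled"]
def S4 : List String := ["twentymin_trade_decision", "trade_execution",
                         "entry_decision", "exit_decision", "exit_signal", "entry_veto",
                         "enhanced_options_bot_execution_complete"]
def S5 : List String := ["pnl_attribution_exit", "pnl_attribution_entry"]
def S6 : List String := ["halt_triggered", "correlation_guard_alert",
                         "vol_of_vol_alert", "pnl_monitor_fat_tail_detected", "pnl_monitor_halt",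
                         "macro_intel_update", "smart_money_signal"]

-- B-side helper: the category → event-type-set table (Source B's _CATEGORY_TYPES)
def categoryTypes : List (String × List String) :=
  [("ml_signals", S1), ("news_sentiment", S2), ("risk_gates", S3),
   ("trade_decisions", S4), ("pnl_attribution", S5), ("alerts", S6)]

def categorize_events_alt (events : List (List (String × String))) : List (String × List (List (String × String))) :=
  categoryTypes.map (fun p =>
    (p.1, events.filter (fun e => p.2.contains (PySem.Dict.getD (PySem.Dict.ofList e) "event" ""))))

-- ===== PRECONDITION & SPEC =====
def Spec_categorize_events (events : List (List (String × String))) (out : List (String × List (List (String × String)))) : Prop := out = categorize_events_alt events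
instance (events : List (List (String × String))) (out : List (String × List (List (String × String)))) : Decidable (Spec_categorize_events events out) := by unfold Spec_categorize_events; infer_instance

-- ===== CLAIM =====
def Claim_equal_categorize_events : Prop := ∀ (events : List (List (String × String))), Dom_categorize_events events → Spec_categorize_events events (categorize_events events)

-- ===== LEMMAS AND PROOFS =====

-- A's loop body, written with the named sets (definitionally equal to the lambda in A's port)
def stepA (categories : PySem.Dict String (List (List (String × String))))
    (event : List (String × String)) : PySem.Dict String (List (List (String × String))) :=
  let event_type := PySem.Dict.getD (PySem.Dict.ofList event) "event" ""
  if S1.contains event_type then categories.modify "ml_signals" [] (· ++ [event])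
  else if S2.contains event_type then categories.modify "news_sentiment" [] (· ++ [event])
  else if S3.contains event_type then categories.modify "risk_gates" [] (· ++ [event])
  else if S4.contains event_type then categories.modify "trade_decisions" [] (· ++ [event])
  else if S5.contains event_type then categories.modify "pnl_attribution" [] (· ++ [event])
  else if S6.contains event_type then categories.modify "alerts" [] (· ++ [event])
  else categories

-- membership in one literal list rules out membership in a disjoint literal list
theorem contains_false_of_disjoint (l1 l2 : List String) (t : String)
    (h : l1.contains t = true) (hd : l1.all (fun x => !l2.contains x) = true) :
    l2.contains t = false := by
  simp only [List.all_eq_true, Bool.not_eq_true'] at hd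
  exact hd t (by simpa using h)

-- the generalized invariant: A's fold from arbitrary six accumulators appends,
-- per category, exactly the events whose type lies in that category's set
theorem foldA_items (events : List (List (String × String)))
    (l1 l2 l3 l4 l5 l6 : List (List (String × String))) :
    (events.foldl stepA
      (PySem.Dict.mk [("ml_signals", l1), ("news_sentiment", l2), ("risk_gates", l3),
                      ("trade_decisions", l4), ("pnl_attribution", l5), ("alerts", l6)])).items =
    [("ml_signals", l1 ++ events.filter (fun e => S1.contains (PySem.Dict.getD (PySem.Dict.ofList e) "event" ""))),
     ("news_sentiment", l2 ++ events.filter (fun e => S2.contains (PySem.Dict.getD (PySem.Dict.ofList e) "event" ""))),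
     ("risk_gates", l3 ++ events.filter (fun e => S3.contains (PySem.Dict.getD (PySem.Dict.ofList e) "event" ""))),
     ("trade_decisions", l4 ++ events.filter (fun e => S4.contains (PySem.Dict.getD (PySem.Dict.ofList e) "event" ""))),
     ("pnl_attribution", l5 ++ events.filter (fun e => S5.contains (PySem.Dict.getD (PySem.Dict.ofList e) "event" ""))),
     ("alerts", l6 ++ events.filter (fun e => S6.contains (PySem.Dict.getD (PySem.Dict.ofList e) "event" "")))] := by
  induction events generalizing l1 l2 l3 l4 l5 l6 with
  | nil => simp
  | cons ev rest ih =>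
    rw [List.foldl_cons]
    set t := PySem.Dict.getD (PySem.Dict.ofList ev) "event" "" with ht
    by_cases h1 : S1.contains t = true
    · have h2 := contains_false_of_disjoint S1 S2 t h1 (by decide)
      have h3 := contains_false_of_disjoint S1 S3 t h1 (by decide)
      have h4 := contains_false_of_disjoint S1 S4 t h1 (by decide)
      have h5 := contains_false_of_disjoint S1 S5 t h1 (by decide)
      have h6 := contains_false_of_disjoint S1 S6 t h1 (by decide)
      simp at h1 h2 h3 h4 h5 h6
      have hs : stepA (PySem.Dict.mk [("ml_signals", l1), ("news_sentiment", l2), ("risk_gates", l3), ("trade_decisions", l4), ("pnl_attribution", l5), ("alerts", l6)]) ev =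
          PySem.Dict.mk [("ml_signals", l1 ++ [ev]), ("news_sentiment", l2), ("risk_gates", l3), ("trade_decisions", l4), ("pnl_attribution", l5), ("alerts", l6)] := by
        simp only [stepA]; rw [← ht]
        simp [h1, PySem.Dict.modify, PySem.Dict.insert, PySem.Dict.getD, PySem.Dict.get?, PySem.Dict.contains]
      rw [hs, ih]
      simp [← ht, h1, h2, h3, h4, h5, h6]
    · rw [Bool.not_eq_true] at h1
      by_cases h2 : S2.contains t = true
      · have h3 := contains_false_of_disjoint S2 S3 t h2 (by decide)
        have h4 := contains_false_of_disjoint S2 S4 t h2 (by decide)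
        have h5 := contains_false_of_disjoint S2 S5 t h2 (by decide)
        have h6 := contains_false_of_disjoint S2 S6 t h2 (by decide)
        simp at h1 h2 h3 h4 h5 h6
        have hs : stepA (PySem.Dict.mk [("ml_signals", l1), ("news_sentiment", l2), ("risk_gates", l3), ("trade_decisions", l4), ("pnl_attribution", l5), ("alerts", l6)]) ev =
            PySem.Dict.mk [("ml_signals", l1), ("news_sentiment", l2 ++ [ev]), ("risk_gates", l3), ("trade_decisions", l4), ("pnl_attribution", l5), ("alerts", l6)] := by
          simp only [stepA]; rw [← ht]
          simp [h1, h2, PySem.Dict.modify, PySem.Dict.insert, PySem.Dict.getD, PySem.Dict.get?, PySem.Dict.contains]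
        rw [hs, ih]
        simp [← ht, h1, h2, h3, h4, h5, h6]
      · rw [Bool.not_eq_true] at h2
        by_cases h3 : S3.contains t = true
        · have h4 := contains_false_of_disjoint S3 S4 t h3 (by decide)
          have h5 := contains_false_of_disjoint S3 S5 t h3 (by decide)
          have h6 := contains_false_of_disjoint S3 S6 t h3 (by decide)
          simp at h1 h2 h3 h4 h5 h6
          have hs : stepA (PySem.Dict.mk [("ml_signals", l1), ("news_sentiment", l2), ("risk_gates", l3), ("trade_decisions", l4), ("pnl_attribution", l5), ("alerts", l6)]) ev =
              PySem.Dict.mk [("ml_signals", l1), ("news_sentiment", l2), ("risk_gates", l3 ++ [ev]), ("trade_decisions", l4), ("pnl_attribution", l5), ("alerts", l6)] := by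
            simp only [stepA]; rw [← ht]
            simp [h1, h2, h3, PySem.Dict.modify, PySem.Dict.insert, PySem.Dict.getD, PySem.Dict.get?, PySem.Dict.contains]
          rw [hs, ih]
          simp [← ht, h1, h2, h3, h4, h5, h6]
        · rw [Bool.not_eq_true] at h3
          by_cases h4 : S4.contains t = true
          · have h5 := contains_false_of_disjoint S4 S5 t h4 (by decide)
            have h6 := contains_false_of_disjoint S4 S6 t h4 (by decide)
            simp at h1 h2 h3 h4 h5 h6
            have hs : stepA (PySem.Dict.mk [("ml_signals", l1), ("news_sentiment", l2), ("risk_gates", l3), ("trade_decisions", l4), ("pnl_attribution", l5), ("alerts", l6)]) ev =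
                PySem.Dict.mk [("ml_signals", l1), ("news_sentiment", l2), ("risk_gates", l3), ("trade_decisions", l4 ++ [ev]), ("pnl_attribution", l5), ("alerts", l6)] := by
              simp only [stepA]; rw [← ht]
              simp [h1, h2, h3, h4, PySem.Dict.modify, PySem.Dict.insert, PySem.Dict.getD, PySem.Dict.get?, PySem.Dict.contains]
            rw [hs, ih]
            simp [← ht, h1, h2, h3, h4, h5, h6]
          · rw [Bool.not_eq_true] at h4
            by_cases h5 : S5.contains t = true
            · have h6 := contains_false_of_disjoint S5 S6 t h5 (by decide)
              simp at h1 h2 h3 h4 h5 h6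
              have hs : stepA (PySem.Dict.mk [("ml_signals", l1), ("news_sentiment", l2), ("risk_gates", l3), ("trade_decisions", l4), ("pnl_attribution", l5), ("alerts", l6)]) ev =
                  PySem.Dict.mk [("ml_signals", l1), ("news_sentiment", l2), ("risk_gates", l3), ("trade_decisions", l4), ("pnl_attribution", l5 ++ [ev]), ("alerts", l6)] := by
                simp only [stepA]; rw [← ht]
                simp [h1, h2, h3, h4, h5, PySem.Dict.modify, PySem.Dict.insert, PySem.Dict.getD, PySem.Dict.get?, PySem.Dict.contains]
              rw [hs, ih]
              simp [← ht, h1, h2, h3, h4, h5, h6]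
            · rw [Bool.not_eq_true] at h5
              by_cases h6 : S6.contains t = true
              · simp at h1 h2 h3 h4 h5 h6
                have hs : stepA (PySem.Dict.mk [("ml_signals", l1), ("news_sentiment", l2), ("risk_gates", l3), ("trade_decisions", l4), ("pnl_attribution", l5), ("alerts", l6)]) ev =
                    PySem.Dict.mk [("ml_signals", l1), ("news_sentiment", l2), ("risk_gates", l3), ("trade_decisions", l4), ("pnl_attribution", l5), ("alerts", l6 ++ [ev])] := by
                  simp only [stepA]; rw [← ht]
                  simp [h1, h2, h3, h4, h5, h6, PySem.Dict.modify, PySem.Dict.insert, PySem.Dict.getD, PySem.Dict.get?, PySem.Dict.contains]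
                rw [hs, ih]
                simp [← ht, h1, h2, h3, h4, h5, h6]
              · rw [Bool.not_eq_true] at h6
                simp at h1 h2 h3 h4 h5 h6
                have hs : stepA (PySem.Dict.mk [("ml_signals", l1), ("news_sentiment", l2), ("risk_gates", l3), ("trade_decisions", l4), ("pnl_attribution", l5), ("alerts", l6)]) ev =
                    PySem.Dict.mk [("ml_signals", l1), ("news_sentiment", l2), ("risk_gates", l3), ("trade_decisions", l4), ("pnl_attribution", l5), ("alerts", l6)] := by
                  simp only [stepA]; rw [← ht]
                  simp [h1, h2, h3, h4, h5, h6]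
                rw [hs, ih]
                simp [← ht, h1, h2, h3, h4, h5, h6]

-- ===== VERDICT =====
theorem categorize_events_spec : Claim_equal_categorize_events := by
  intro events _
  show categorize_events events = categorize_events_alt events
  refine (foldA_items events [] [] [] [] [] []).trans ?_
  simp [categorize_events_alt, categoryTypes]
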